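-- pv_equiv track=rewrite | github.com/amalrajan/advent-of-code | 2024/10.1.py | solve
-- ===== SOURCE A (Python) =====
-- def solve(grid):
--     # Important thing to notice is that score is counted as how many "9"s you
--     # can reach from each 0. Not every path count.
--     m = len(grid)
--     n = len(grid[0])
--
--     reached = set()
--
--     def dfs(x, y, num, path):
--         if not 0 <= x < m or not 0 <= y < n:
--             return
--
--         if grid[x][y] == 9:
--             reached.add((x, y))
--             return
--
--         temp = grid[x][y]
--         grid[x][y] = -1
--
--         for dx, dy in [(0, 1), (1, 0), (-1, 0), (0, -1)]:
--             nx, ny = x + dx, y + dy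
--             if 0 <= nx < m and 0 <= ny < n and grid[nx][ny] == num + 1:
--                 dfs(nx, ny, num + 1, path + [(nx, ny)])
--
--         grid[x][y] = temp
--
--     ans = 0
--     for i in range(m):
--         for j in range(n):
--             if grid[i][j] == 0:
--                 reached.clear()
--                 dfs(i, j, 0, [(i, j)])
--                 ans += len(reached)
--
--     return ans
-- ===== SOURCE B (Python) =====
-- def solve(grid):
--     # Level-synchronous frontier expansion: for each trailhead 0, advance a set
--     # of cells one height at a time (1..9); the final frontier is the set of
--     # reachable 9s. No recursion, no path enumeration.
--     m = len(grid)
--     n = len(grid[0])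
--     ans = 0
--     for i in range(m):
--         for j in range(n):
--             if grid[i][j] == 0:
--                 frontier = {(i, j)}
--                 for h in range(1, 10):
--                     frontier = {
--                         (x + dx, y + dy)
--                         for (x, y) in frontier
--                         for (dx, dy) in ((0, 1), (1, 0), (-1, 0), (0, -1))
--                         if 0 <= x + dx < m and 0 <= y + dy < n
--                         and grid[x + dx][y + dy] == h
--                     }
--                 ans += len(frontier)
--     return ans
-- ===== Notes on version B (the rewrite author's own statement) =====
-- stated objective: alternative
-- what changed: Replaces the recursive backtracking DFS (with temporary -1 cell marking and per-path recursion) by an iterative level-synchronous frontier: for each trailhead a set of cells is advanced one height level at a time (1..9), so each cell is touched at most once per level instead of once per increasing path.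
import Mathlib
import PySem

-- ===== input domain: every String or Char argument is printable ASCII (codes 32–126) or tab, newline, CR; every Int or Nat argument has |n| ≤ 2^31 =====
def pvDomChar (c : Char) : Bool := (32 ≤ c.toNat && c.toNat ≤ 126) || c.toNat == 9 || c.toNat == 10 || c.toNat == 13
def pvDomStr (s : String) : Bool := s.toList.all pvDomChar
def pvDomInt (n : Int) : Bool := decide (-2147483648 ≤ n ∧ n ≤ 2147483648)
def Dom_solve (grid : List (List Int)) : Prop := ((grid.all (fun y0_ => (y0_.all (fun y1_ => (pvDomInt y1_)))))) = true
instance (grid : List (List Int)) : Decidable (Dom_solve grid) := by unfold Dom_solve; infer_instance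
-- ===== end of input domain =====

-- B replaces A's recursive backtracking DFS by an iterative level-synchronous frontier
-- expansion (objective: alternative exact algorithm; A's transient grid mutation is
-- restored before A returns, so the caller observes no difference in side effects).

-- ===== PORT A =====

-- grid[x][y] read; exact whenever 0 ≤ x < len(grid) and 0 ≤ y < len(grid[x]),
-- which holds at every use site on inputs satisfying Pre_solve.
def pvCell (g : List (List Int)) (x y : Int) : Int :=
  PySem.List.pyGetD ((PySem.List.pyGet? g x).getD []) y 0

-- grid[x][y] = v; A uses it only with bounds-checked nonnegative x, y.
def pvSetCell (g : List (List Int)) (x y : Int) (v : Int) : List (List Int) :=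
  g.modify x.toNat (fun row => row.set y.toNat v)

def pvDirs : List (Int × Int) := [(0, 1), (1, 0), (-1, 0), (0, -1)]

-- A's dfs; the mutable grid and `reached` are threaded as state. The fuel only makes
-- the recursion structural; at fuel 10 it is never exhausted (num increases by 1 per
-- call and stays in 0..9, as the proofs below establish).
def dfsA (m n : Int) : Nat → List (List Int) → Int → Int → Int → List (Int × Int) →
    PySem.Set (Int × Int) → List (List Int) × PySem.Set (Int × Int)
  | 0, g, _, _, _, _, reached => (g, reached)
  | fuel + 1, g, x, y, num, path, reached =>
    if ¬(0 ≤ x ∧ x < m ∧ 0 ≤ y ∧ y < n) then (g, reached)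
    else if pvCell g x y = 9 then (g, PySem.Set.add reached (x, y))
    else
      let temp := pvCell g x y
      let g1 := pvSetCell g x y (-1)
      let st := pvDirs.foldl
        (fun (st : List (List Int) × PySem.Set (Int × Int)) d =>
          let nx := x + d.1
          let ny := y + d.2
          if 0 ≤ nx ∧ nx < m ∧ 0 ≤ ny ∧ ny < n ∧ pvCell st.1 nx ny = num + 1 then
            dfsA m n fuel st.1 nx ny (num + 1) (path ++ [(nx, ny)]) st.2
          else st) (g1, reached)
      (pvSetCell st.1 x y temp, st.2)

def solve (grid : List (List Int)) : Int :=
  let m : Int := (grid.length : Int)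
  let n : Int := (((PySem.List.pyGet? grid 0).getD []).length : Int)
  let st := (PySem.List.pyRange 0 m 1).foldl
    (fun (st : List (List Int) × Int) i =>
      (PySem.List.pyRange 0 n 1).foldl
        (fun (st : List (List Int) × Int) j =>
          if pvCell st.1 i j = 0 then
            let res := dfsA m n 10 st.1 i j 0 [(i, j)] PySem.Set.empty
            (res.1, st.2 + (res.2.length : Int))
          else st) st) (grid, 0)
  st.2

-- ===== PORT B =====

def pvNbrs (c : Int × Int) : List (Int × Int) :=
  pvDirs.map (fun d => (c.1 + d.1, c.2 + d.2))

-- one frontier step of B: the set comprehension over the current frontier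
def stepB (g : List (List Int)) (m n h : Int) (fr : PySem.Set (Int × Int)) :
    PySem.Set (Int × Int) :=
  PySem.Set.ofList (fr.flatMap (fun c =>
    (pvNbrs c).filter (fun t =>
      decide (0 ≤ t.1 ∧ t.1 < m ∧ 0 ≤ t.2 ∧ t.2 < n) && (pvCell g t.1 t.2 == h))))

def solve_alt (grid : List (List Int)) : Int :=
  let m : Int := (grid.length : Int)
  let n : Int := (((PySem.List.pyGet? grid 0).getD []).length : Int)
  (PySem.List.pyRange 0 m 1).foldl
    (fun ans i =>
      (PySem.List.pyRange 0 n 1).foldl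
        (fun ans j =>
          if pvCell grid i j = 0 then
            let fr := (PySem.List.pyRange 1 10 1).foldl
              (fun fr h => stepB grid m n h fr) (PySem.Set.ofList [(i, j)])
            ans + (fr.length : Int)
          else ans) ans) 0

-- ===== PRECONDITION & SPEC =====

-- Pre_ excludes exactly the inputs on which the Python A raises IndexError: the empty
-- grid (grid[0]) and ragged grids with a row shorter than the first row (the i/j scan
-- reads grid[i][j] for every j < len(grid[0]), so it always reaches a too-short row).
def Pre_solve (grid : List (List Int)) : Prop :=
  grid ≠ [] ∧ ∀ row ∈ grid, (grid.headD []).length ≤ row.length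

instance (grid : List (List Int)) : Decidable (Pre_solve grid) := by
  unfold Pre_solve; infer_instance

def pvWitness_solve : List (List Int) := [[0, 1], [2, 9]]

def Spec_solve (grid : List (List Int)) (out : Int) : Prop := out = solve_alt grid
instance (grid : List (List Int)) (out : Int) : Decidable (Spec_solve grid out) := by
  unfold Spec_solve; infer_instance

-- ===== CLAIM (what is proved, stated in full; the proofs are below) =====
def Claim_equal_solve : Prop :=
  ∀ (grid : List (List Int)), Dom_solve grid → Pre_solve grid → Spec_solve grid (solve grid)

-- ===== LEMMAS AND PROOFS =====

-- cells in bounds of the m × n board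
def Inb (m n : Int) (c : Int × Int) : Prop :=
  0 ≤ c.1 ∧ c.1 < m ∧ 0 ≤ c.2 ∧ c.2 < n

-- rows at least n long (the shape Pre_solve gives for n = len(grid[0]))
def RowsLen (g : List (List Int)) (n : Int) : Prop :=
  ∀ row ∈ g, n ≤ (row.length : Int)

-- backward spec: targets reachable from c upward in k strictly +1 steps (A's dfs)
def UpP (g : List (List Int)) (m n : Int) : Nat → (Int × Int) → (Int × Int) → Prop
  | 0, c, t => t = c
  | k + 1, c, t => ∃ d ∈ pvNbrs c, Inb m n d ∧
      pvCell g d.1 d.2 = pvCell g c.1 c.2 + 1 ∧ UpP g m n k d t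

-- forward spec: cells of height k reachable from s by a 0,1,…,k trail (B's frontier)
def ChainF (g : List (List Int)) (m n : Int) (s : Int × Int) : Nat → (Int × Int) → Prop
  | 0, t => t = s
  | h + 1, t => Inb m n t ∧ pvCell g t.1 t.2 = (h : Int) + 1 ∧
      ∃ p, ChainF g m n s h p ∧ t ∈ pvNbrs p

-- the grid with every cell of M overwritten by -1 (A's in-progress marking)
def markg (g : List (List Int)) (M : List (Int × Int)) : List (List Int) :=
  M.foldr (fun c G => pvSetCell G c.1 c.2 (-1)) g

lemma rowsLen_pvSetCell {g : List (List Int)} {n : Int} (h : RowsLen g n) (x y v : Int) :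
    RowsLen (pvSetCell g x y v) n := by
  intro row hrow
  rw [List.mem_iff_getElem?] at hrow
  obtain ⟨i, hi⟩ := hrow
  rw [pvSetCell, List.getElem?_modify] at hi
  cases hg : g[i]? with
  | none => rw [hg] at hi; simp at hi
  | some r =>
    rw [hg] at hi
    have hrm : r ∈ g := List.mem_of_getElem? hg
    have := h r hrm
    simp only [Option.map_eq_map, Option.map_some, Option.some_inj] at hi
    split at hi <;> (subst hi; simpa using this)

lemma pvCell_pvSetCell {g : List (List Int)} {n : Int} (hr : RowsLen g n)
    (v : Int) {a b : Int} (ha : 0 ≤ a) (hab : a < (g.length : Int)) (hb : 0 ≤ b) (hb2 : b < n)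
    {x y : Int} (hx : 0 ≤ x) (hy : 0 ≤ y) :
    pvCell (pvSetCell g a b v) x y = if x = a ∧ y = b then v else pvCell g x y := by
  have hx' : PySem.List.pyGet? (pvSetCell g a b v) x = (g.modify a.toNat (fun row => row.set b.toNat v))[x.toNat]? := by
    rw [pvSetCell, PySem.List.pyGet?_of_nonneg _ hx]
  simp only [pvCell, hx', List.getElem?_modify, PySem.List.pyGet?_of_nonneg _ hx,
    PySem.List.pyGetD_of_nonneg _ _ hy]
  cases hg : g[x.toNat]? with
  | none =>
    have : ¬ (x = a ∧ y = b) := by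
      rintro ⟨rfl, rfl⟩
      rw [List.getElem?_eq_none_iff] at hg
      omega
    simp [this]
  | some r =>
    have hrlen : n ≤ (r.length : Int) := hr r (List.mem_of_getElem? hg)
    by_cases hxa : a.toNat = x.toNat
    · have hxa' : x = a := by omega
      simp only [Option.map_eq_map, Option.map_some, hxa, if_pos rfl, Option.getD_some]
      by_cases hyb : y = b
      · subst hyb hxa'
        have : y.toNat < r.length := by omega
        simp [List.getD, List.getElem?_set, this]
      · have : y.toNat ≠ b.toNat := by omega
        simp [List.getD, List.getElem?_set, hyb, hxa', Ne.symm this]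
    · have : ¬(x = a ∧ y = b) := by rintro ⟨rfl, rfl⟩; omega
      simp [hxa, this]

lemma pvSetCell_self {g : List (List Int)} {n : Int} (hr : RowsLen g n)
    {x y : Int} (hx : 0 ≤ x) (hx2 : x < (g.length : Int)) (hy : 0 ≤ y) (hy2 : y < n) :
    pvSetCell g x y (pvCell g x y) = g := by
  have hxl : x.toNat < g.length := by omega
  apply List.ext_getElem?
  intro i
  rw [pvSetCell, List.getElem?_modify]
  cases hg : g[i]? with
  | none => simp
  | some r =>
    simp only [Option.map_eq_map, Option.map_some]
    split
    · next h =>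
      subst h
      congr 1
      have hyr : y.toNat < r.length := by
        have := hr r (List.mem_of_getElem? hg)
        omega
      have : pvCell g x y = r[y.toNat] := by
        simp [pvCell, PySem.List.pyGet?_of_nonneg _ hx, PySem.List.pyGetD_of_nonneg _ _ hy, hg,
          List.getD, List.getElem?_eq_getElem hyr]
      rw [this, List.set_getElem_self hyr]
    · rfl

lemma pvSetCell_pvSetCell (g : List (List Int)) (x y v w : Int) :
    pvSetCell (pvSetCell g x y v) x y w = pvSetCell g x y w := by
  apply List.ext_getElem?
  intro i
  simp [pvSetCell, List.getElem?_modify]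
  rcases g[i]? with _ | row <;> simp <;> split <;> simp [List.set_set]

lemma length_markg (g : List (List Int)) (M : List (Int × Int)) :
    (markg g M).length = g.length := by
  induction M with
  | nil => rfl
  | cons c M ih => simp [markg, pvSetCell] at ih ⊢; exact ih

lemma rowsLen_markg {g : List (List Int)} {n : Int} (h : RowsLen g n) (M : List (Int × Int)) :
    RowsLen (markg g M) n := by
  induction M with
  | nil => exact h
  | cons c M ih => exact rowsLen_pvSetCell ih c.1 c.2 (-1)

lemma pvCell_markg {g : List (List Int)} {n : Int} (hr : RowsLen g n)
    {M : List (Int × Int)} (hM : ∀ c ∈ M, Inb (g.length : Int) n c)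
    {x y : Int} (hx : 0 ≤ x) (hy : 0 ≤ y) :
    pvCell (markg g M) x y = if (x, y) ∈ M then -1 else pvCell g x y := by
  induction M with
  | nil => simp [markg]
  | cons c M ih =>
    have hc := hM c (by simp)
    obtain ⟨h1, h2, h3, h4⟩ := hc
    have hrest : ∀ a ∈ M, Inb (g.length : Int) n a := fun a ha => hM a (by simp [ha])
    have : markg g (c :: M) = pvSetCell (markg g M) c.1 c.2 (-1) := rfl
    rw [this, pvCell_pvSetCell (rowsLen_markg hr M) (-1) h1 (by rw [length_markg]; exact h2) h3 h4 hx hy,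
      ih hrest]
    by_cases hxy : (x, y) = c
    · have : x = c.1 ∧ y = c.2 := by rw [← hxy]; exact ⟨rfl, rfl⟩
      simp [this, hxy]
    · have : ¬(x = c.1 ∧ y = c.2) := by
        rintro ⟨rfl, rfl⟩; exact hxy rfl
      simp [this, hxy]

lemma dfsA_run (g : List (List Int)) (n : Int) (hr : RowsLen g n) :
    ∀ (j fuel : Nat) (x y num : Int) (M path : List (Int × Int)) (r : PySem.Set (Int × Int)),
    j < fuel → (num : Int) + (j : Int) = 9 → 0 ≤ num →
    Inb (g.length : Int) n (x, y) → pvCell g x y = num →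
    (∀ c ∈ M, Inb (g.length : Int) n c ∧ pvCell g c.1 c.2 < num) →
    r.Nodup →
    ∃ r', dfsA (g.length : Int) n fuel (markg g M) x y num path r = (markg g M, r') ∧
      r'.Nodup ∧ ∀ t, t ∈ r' ↔ (t ∈ r ∨ UpP g (g.length : Int) n j (x, y) t) := by
  intro j
  induction j with
  | zero =>
    intro fuel x y num M path r hfuel hnum9 hnum0 hin hval hM hnodup
    obtain ⟨fuel, rfl⟩ : ∃ f, fuel = f + 1 := ⟨fuel - 1, by omega⟩
    have hnum : num = 9 := by omega
    have hnotM : (x, y) ∉ M := fun hmem => by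
      have := (hM _ hmem).2; simp at this; omega
    have hcell : pvCell (markg g M) x y = 9 := by
      rw [pvCell_markg hr (fun c hc => (hM c hc).1) hin.1 hin.2.2.1, if_neg hnotM, hval, hnum]
    refine ⟨PySem.Set.add r (x, y), ?_, PySem.Set.nodup_add _ _ hnodup, ?_⟩
    · simp only [dfsA]
      rw [if_neg (not_not_intro ⟨hin.1, hin.2.1, hin.2.2.1, hin.2.2.2⟩)]
      rw [if_pos hcell]
    · intro t
      rw [PySem.Set.mem_add]
      simp [UpP]
  | succ j ih =>
    intro fuel x y num M path r hfuel hnum9 hnum0 hin hval hM hnodup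
    obtain ⟨fuel, rfl⟩ : ∃ f, fuel = f + 1 := ⟨fuel - 1, by omega⟩
    have hnum8 : num ≤ 8 := by omega
    have hMI : ∀ c ∈ M, Inb (g.length : Int) n c := fun c hc => (hM c hc).1
    have hnotM : (x, y) ∉ M := fun hmem => by
      have := (hM _ hmem).2; simp at this; omega
    have hcell : pvCell (markg g M) x y = num := by
      rw [pvCell_markg hr hMI hin.1 hin.2.2.1, if_neg hnotM, hval]
    have hM' : ∀ c ∈ ((x, y) :: M), Inb (g.length : Int) n c ∧ pvCell g c.1 c.2 < num + 1 := by
      intro c hc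
      rcases List.mem_cons.mp hc with rfl | hc'
      · exact ⟨hin, by simp [hval]⟩
      · exact ⟨(hM c hc').1, by have := (hM c hc').2; omega⟩
    -- the four-direction loop, generalized over the remaining direction list
    have fold_claim : ∀ (ds : List (Int × Int)) (r0 : PySem.Set (Int × Int)), r0.Nodup →
        ∃ r1, ds.foldl
            (fun (st : List (List Int) × PySem.Set (Int × Int)) d =>
              if 0 ≤ x + d.1 ∧ x + d.1 < (g.length : Int) ∧ 0 ≤ y + d.2 ∧ y + d.2 < n ∧
                  pvCell st.1 (x + d.1) (y + d.2) = num + 1 then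
                dfsA (g.length : Int) n fuel st.1 (x + d.1) (y + d.2) (num + 1)
                  (path ++ [(x + d.1, y + d.2)]) st.2
              else st) (markg g ((x, y) :: M), r0) =
          (markg g ((x, y) :: M), r1) ∧ r1.Nodup ∧
          ∀ t, t ∈ r1 ↔ (t ∈ r0 ∨ ∃ d ∈ ds, Inb (g.length : Int) n (x + d.1, y + d.2) ∧
            pvCell g (x + d.1) (y + d.2) = num + 1 ∧
            UpP g (g.length : Int) n j (x + d.1, y + d.2) t) := by
      intro ds
      induction ds with
      | nil => intro r0 h0; exact ⟨r0, rfl, h0, by simp⟩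
      | cons d ds ihd =>
        intro r0 h0
        by_cases hcond : Inb (g.length : Int) n (x + d.1, y + d.2) ∧
            pvCell g (x + d.1) (y + d.2) = num + 1
        · obtain ⟨hcin, hcval⟩ := hcond
          have hmarked : pvCell (markg g ((x, y) :: M)) (x + d.1) (y + d.2) = num + 1 := by
            rw [pvCell_markg hr (fun c hc => (hM' c hc).1) hcin.1 hcin.2.2.1]
            rw [if_neg, hcval]
            intro hmem
            have := (hM' _ hmem).2
            simp at this; omega
          obtain ⟨r2, heq2, hnd2, hmem2⟩ := ih fuel (x + d.1) (y + d.2) (num + 1)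
            ((x, y) :: M) (path ++ [(x + d.1, y + d.2)]) r0 (by omega) (by push_cast; push_cast at hnum9; omega)
            (by omega) hcin hcval hM' h0
          obtain ⟨r1, heq1, hnd1, hmem1⟩ := ihd r2 hnd2
          refine ⟨r1, ?_, hnd1, ?_⟩
          · rw [List.foldl_cons]
            rw [if_pos (by exact ⟨hcin.1, hcin.2.1, hcin.2.2.1, hcin.2.2.2, hmarked⟩)]
            rw [heq2]
            exact heq1
          · intro t
            rw [hmem1, hmem2]
            constructor
            · rintro ((h | h) | h)
              · exact Or.inl h
              · exact Or.inr ⟨d, by simp, hcin, hcval, h⟩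
              · obtain ⟨e, he, h⟩ := h
                exact Or.inr ⟨e, by simp [he], h⟩
            · rintro (h | ⟨e, he, h⟩)
              · exact Or.inl (Or.inl h)
              · rcases List.mem_cons.mp he with rfl | he'
                · exact Or.inl (Or.inr h.2.2)
                · exact Or.inr ⟨e, he', h⟩
        · have hmarked : ¬(0 ≤ x + d.1 ∧ x + d.1 < (g.length : Int) ∧ 0 ≤ y + d.2 ∧
              y + d.2 < n ∧ pvCell (markg g ((x, y) :: M)) (x + d.1) (y + d.2) = num + 1) := by
            rintro ⟨h1, h2, h3, h4, h5⟩
            apply hcond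
            refine ⟨⟨h1, h2, h3, h4⟩, ?_⟩
            rw [pvCell_markg hr (fun c hc => (hM' c hc).1) h1 h3] at h5
            split at h5
            · omega
            · exact h5
          obtain ⟨r1, heq1, hnd1, hmem1⟩ := ihd r0 h0
          refine ⟨r1, ?_, hnd1, ?_⟩
          · rw [List.foldl_cons, if_neg hmarked]
            exact heq1
          · intro t
            rw [hmem1]
            constructor
            · rintro (h | ⟨e, he, h⟩)
              · exact Or.inl h
              · exact Or.inr ⟨e, by simp [he], h⟩
            · rintro (h | ⟨e, he, h⟩)
              · exact Or.inl h
              · rcases List.mem_cons.mp he with rfl | he'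
                · exact absurd (⟨h.1, h.2.1⟩ : Inb (g.length : Int) n (x + e.1, y + e.2) ∧
                    pvCell g (x + e.1) (y + e.2) = num + 1) hcond
                · exact Or.inr ⟨e, he', h⟩
    obtain ⟨r1, heq, hnd, hmem⟩ := fold_claim pvDirs r hnodup
    refine ⟨r1, ?_, hnd, ?_⟩
    · simp only [dfsA]
      rw [if_neg (not_not_intro ⟨hin.1, hin.2.1, hin.2.2.1, hin.2.2.2⟩)]
      rw [if_neg (by rw [hcell]; omega)]
      have hmg : pvSetCell (markg g M) x y (-1) = markg g ((x, y) :: M) := rfl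
      rw [hcell, hmg, heq]
      have h1 : pvCell (markg g M) x y = pvCell g x y := by rw [hcell, hval]
      rw [show pvSetCell (markg g ((x, y) :: M)) x y num =
            pvSetCell (markg g M) x y num from pvSetCell_pvSetCell _ _ _ _ _]
      rw [← hval, ← h1]
      rw [pvSetCell_self (rowsLen_markg hr M) hin.1 (by rw [length_markg]; exact hin.2.1)
        hin.2.2.1 hin.2.2.2]
    · intro t
      rw [hmem]
      apply or_congr Iff.rfl
      show _ ↔ UpP g (g.length : Int) n (j + 1) (x, y) t
      simp only [UpP, pvNbrs, hval]
      constructor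
      · rintro ⟨d, hd, h1, h2, h3⟩
        exact ⟨(x + d.1, y + d.2), List.mem_map.mpr ⟨d, hd, rfl⟩, h1, h2, h3⟩
      · rintro ⟨c, hc, h1, h2, h3⟩
        obtain ⟨d, hd, rfl⟩ := List.mem_map.mp hc
        exact ⟨d, hd, h1, h2, h3⟩

lemma mem_stepB (g : List (List Int)) (m n h : Int) (fr : PySem.Set (Int × Int)) (t : Int × Int) :
    t ∈ stepB g m n h fr ↔ (Inb m n t ∧ pvCell g t.1 t.2 = h ∧ ∃ c ∈ fr, t ∈ pvNbrs c) := by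
  simp [stepB, PySem.Set.mem_ofList, List.mem_flatMap, List.mem_filter, Inb]
  tauto

lemma frontier_run (g : List (List Int)) (m n : Int) (s : Int × Int) :
    ∀ k : Nat,
      ((PySem.List.pyRange 1 ((k : Int) + 1) 1).foldl
        (fun fr h => stepB g m n h fr) (PySem.Set.ofList [s])).Nodup ∧
      ∀ t, t ∈ (PySem.List.pyRange 1 ((k : Int) + 1) 1).foldl
          (fun fr h => stepB g m n h fr) (PySem.Set.ofList [s]) ↔ ChainF g m n s k t := by
  intro k
  induction k with
  | zero =>
    rw [show ((0 : Nat) : Int) + 1 = 1 by norm_num, PySem.List.pyRange_one_eq_nil (le_refl 1)]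
    exact ⟨PySem.Set.nodup_ofList _, by simp [PySem.Set.mem_ofList, ChainF]⟩
  | succ k ih =>
    have hstep : ((k : Int) + 1 : Int) + 1 = ((k + 1 : Nat) : Int) + 1 := by push_cast; ring
    rw [← hstep, PySem.List.pyRange_one_succ_right (by omega), List.foldl_append]
    refine ⟨PySem.Set.nodup_ofList _, ?_⟩
    intro t
    simp only [List.foldl_cons, List.foldl_nil]
    rw [mem_stepB]
    show _ ↔ ChainF g m n s (k + 1) t
    simp only [ChainF]
    constructor
    · rintro ⟨h1, h2, c, hc, h3⟩
      exact ⟨h1, h2, c, (ih.2 c).mp hc, h3⟩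
    · rintro ⟨h1, h2, c, hc, h3⟩
      exact ⟨h1, h2, c, (ih.2 c).mpr hc, h3⟩

lemma chainF_val (g : List (List Int)) (m n : Int) (s : Int × Int)
    (hs : pvCell g s.1 s.2 = 0) :
    ∀ (j : Nat) (c : Int × Int), ChainF g m n s j c → pvCell g c.1 c.2 = (j : Int) := by
  intro j c hc
  cases j with
  | zero => cases hc; simpa using hs
  | succ j => obtain ⟨_, hv, _⟩ := hc; rw [hv]; push_cast; ring

lemma bridge (g : List (List Int)) (m n : Int) (s : Int × Int)
    (hs : pvCell g s.1 s.2 = 0) :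
    ∀ (k j : Nat), j + k = 9 →
      ∀ t, (∃ c, ChainF g m n s j c ∧ UpP g m n k c t) ↔ ChainF g m n s 9 t := by
  intro k
  induction k with
  | zero =>
    intro j hj t
    have : j = 9 := by omega
    subst this
    simp [UpP]
  | succ k ihk =>
    intro j hj t
    rw [← ihk (j + 1) (by omega) t]
    constructor
    · rintro ⟨c, hc, d, hd, h1, h2, h3⟩
      refine ⟨d, ⟨h1, ?_, c, hc, hd⟩, h3⟩
      rw [h2, chainF_val g m n s hs j c hc]
    · rintro ⟨d, ⟨h1, h2, c, hc, hd⟩, h3⟩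
      refine ⟨c, hc, d, hd, h1, ?_, h3⟩
      rw [h2, chainF_val g m n s hs j c hc]

lemma per_zero (g : List (List Int)) (n : Int) (hr : RowsLen g n) (i j : Int)
    (hi : 0 ≤ i) (hi2 : i < (g.length : Int)) (hj : 0 ≤ j) (hj2 : j < n)
    (h0 : pvCell g i j = 0) :
    (dfsA (g.length : Int) n 10 g i j 0 [(i, j)] PySem.Set.empty).1 = g ∧
    ((dfsA (g.length : Int) n 10 g i j 0 [(i, j)] PySem.Set.empty).2.length : Int) =
      (((PySem.List.pyRange 1 10 1).foldl
        (fun fr h => stepB g (g.length : Int) n h fr) (PySem.Set.ofList [(i, j)])).length : Int) := by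
  obtain ⟨r', heq, hnd, hmem⟩ := dfsA_run g n hr 9 10 i j 0 [] [(i, j)] PySem.Set.empty
    (by omega) (by norm_num) (le_refl 0) ⟨hi, hi2, hj, hj2⟩ h0 (by simp) (by simp [PySem.Set.empty])
  have hmg : markg g [] = g := rfl
  rw [hmg] at heq
  obtain ⟨hndB, hmemB⟩ := frontier_run g (g.length : Int) n (i, j) 9
  have h10 : ((9 : Nat) : Int) + 1 = 10 := by norm_num
  rw [h10] at hndB hmemB
  rw [heq]
  refine ⟨rfl, ?_⟩
  have hperm : r'.Perm ((PySem.List.pyRange 1 10 1).foldl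
      (fun fr h => stepB g (g.length : Int) n h fr) (PySem.Set.ofList [(i, j)])) := by
    rw [List.perm_ext_iff_of_nodup hnd hndB]
    intro t
    rw [hmem t, hmemB t]
    have hb := bridge g (g.length : Int) n (i, j) h0 9 0 (by norm_num) t
    have hb9 : UpP g (g.length : Int) n 9 (i, j) t ↔ ChainF g (g.length : Int) n (i, j) 9 t := by
      rw [← hb]
      constructor
      · intro h; exact ⟨(i, j), show (i, j) = (i, j) from rfl, h⟩
      · rintro ⟨c, hc, h⟩
        have hcs : c = (i, j) := hc
        rwa [hcs] at h
    rw [← hb9]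
    simp [PySem.Set.empty]
  rw [hperm.length_eq]

lemma solve_eq (grid : List (List Int)) (hne : grid ≠ [])
    (hrows : ∀ row ∈ grid, (grid.headD []).length ≤ row.length) :
    solve grid = solve_alt grid := by
  obtain ⟨hd, tl, rfl⟩ : ∃ h t, grid = h :: t := by
    cases grid with
    | nil => exact absurd rfl hne
    | cons a b => exact ⟨a, b, rfl⟩
  set g := hd :: tl with hg
  have hn0 : (PySem.List.pyGet? g 0).getD [] = hd := by
    simp [hg, PySem.List.pyGet?_zero_cons]
  have hr : RowsLen g (hd.length : Int) := by
    intro row hrow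
    have := hrows row hrow
    simp [hg] at this ⊢
    omega
  show solve g = solve_alt g
  unfold solve solve_alt
  rw [hn0]
  have inner : ∀ (i : Int), 0 ≤ i → i < (g.length : Int) →
      ∀ (js : List Int), (∀ j ∈ js, 0 ≤ j ∧ j < (hd.length : Int)) → ∀ (acc : Int),
      (js.foldl (fun (st : List (List Int) × Int) j =>
          if pvCell st.1 i j = 0 then
            let res := dfsA (g.length : Int) (hd.length : Int) 10 st.1 i j 0 [(i, j)] PySem.Set.empty
            (res.1, st.2 + (res.2.length : Int))
          else st) (g, acc)) =
        (g, js.foldl (fun ans j =>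
          if pvCell g i j = 0 then
            let fr := (PySem.List.pyRange 1 10 1).foldl
              (fun fr h => stepB g (g.length : Int) (hd.length : Int) h fr) (PySem.Set.ofList [(i, j)])
            ans + (fr.length : Int)
          else ans) acc) := by
    intro i hi hi2 js
    induction js with
    | nil => intro _ acc; rfl
    | cons j js ihj =>
      intro hbnd acc
      have hjb := hbnd j (by simp)
      simp only [List.foldl_cons]
      by_cases hz : pvCell g i j = 0
      · obtain ⟨hfix, hlen⟩ := per_zero g (hd.length : Int) hr i j hi hi2 hjb.1 hjb.2 hz
        rw [if_pos hz, if_pos hz]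
        simp only [hfix, hlen]
        exact ihj (fun a ha => hbnd a (by simp [ha])) _
      · rw [if_neg hz, if_neg hz]
        exact ihj (fun a ha => hbnd a (by simp [ha])) _
  have outer : ∀ (is : List Int), (∀ i ∈ is, 0 ≤ i ∧ i < (g.length : Int)) → ∀ (acc : Int),
      (is.foldl (fun (st : List (List Int) × Int) i =>
        (PySem.List.pyRange 0 (hd.length : Int) 1).foldl
          (fun (st : List (List Int) × Int) j =>
            if pvCell st.1 i j = 0 then
              let res := dfsA (g.length : Int) (hd.length : Int) 10 st.1 i j 0 [(i, j)] PySem.Set.empty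
              (res.1, st.2 + (res.2.length : Int))
            else st) st) (g, acc)) =
      (g, is.foldl (fun ans i =>
        (PySem.List.pyRange 0 (hd.length : Int) 1).foldl
          (fun ans j =>
            if pvCell g i j = 0 then
              let fr := (PySem.List.pyRange 1 10 1).foldl
                (fun fr h => stepB g (g.length : Int) (hd.length : Int) h fr) (PySem.Set.ofList [(i, j)])
              ans + (fr.length : Int)
            else ans) ans) acc) := by
    intro is
    induction is with
    | nil => intro _ acc; rfl
    | cons i is ihi =>
      intro hbnd acc
      have hib := hbnd i (by simp)
      simp only [List.foldl_cons]
      rw [inner i hib.1 hib.2 _ (fun j hj => by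
        rw [PySem.List.mem_pyRange_one] at hj; exact ⟨hj.1, hj.2⟩)]
      exact ihi (fun a ha => hbnd a (by simp [ha])) _
  have houter := outer (PySem.List.pyRange 0 (g.length : Int) 1)
    (fun i hi => by rw [PySem.List.mem_pyRange_one] at hi; exact ⟨hi.1, hi.2⟩) 0
  show ((PySem.List.pyRange 0 (g.length : Int) 1).foldl
      (fun (st : List (List Int) × Int) i =>
        (PySem.List.pyRange 0 (hd.length : Int) 1).foldl
          (fun (st : List (List Int) × Int) j =>
            if pvCell st.1 i j = 0 then
              let res := dfsA (g.length : Int) (hd.length : Int) 10 st.1 i j 0 [(i, j)] PySem.Set.empty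
              (res.1, st.2 + (res.2.length : Int))
            else st) st) (g, 0)).2 =
    (PySem.List.pyRange 0 (g.length : Int) 1).foldl
      (fun ans i =>
        (PySem.List.pyRange 0 (hd.length : Int) 1).foldl
          (fun ans j =>
            if pvCell g i j = 0 then
              let fr := (PySem.List.pyRange 1 10 1).foldl
                (fun fr h => stepB g (g.length : Int) (hd.length : Int) h fr) (PySem.Set.ofList [(i, j)])
              ans + (fr.length : Int)
            else ans) ans) 0
  rw [houter]

-- ===== VERDICT (by name: the statement is the Claim_ definition above) =====
theorem solve_spec : Claim_equal_solve := by
  intro grid _ hpre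
  unfold Spec_solve
  exact solve_eq grid hpre.1 hpre.2
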